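-- pv_equiv track=rewrite | github.com/ivokusi/nasa-space-apps | backend/parse.py | format_factors
-- ===== SOURCE A (Python) =====
-- def get_value(data: dict, key: str, default="N/A") -> str:
--
--     value = data.get(key)
--
--     if not value:
--         value = default
--
--     return value
--
-- def format_factors(data: dict, document_data: dict) -> list:
--
--     """
--     Format the 'factors' section of the data.
--     """
--
--     document_data["factors"] = []
--     factors = data.get("factors", [])
--
--     text = ""
--     for factor in factors:
--
--         factor_name = get_value(factor, "factorName")
--         text += f"{factor_name}\n"
--
--         document_data["factors"].append(factor_name)
--
--     return text.split()
-- ===== SOURCE B (Python) =====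
-- def format_factors(data, document_data):
--     factors = data.get("factors", [])
--     names = [f.get("factorName") or "N/A" for f in factors]
--     document_data["factors"] = names
--     words = []
--     for name in names:
--         words.extend(name.split())
--     return words
-- ===== Notes on version B (the rewrite author's own statement) =====
-- stated objective: simpler
-- what changed: B gathers the factor names with a comprehension and tokenizes each name independently (extend with name.split()), instead of A's accumulating loop that builds one newline-joined string helper-call by helper-call and does a single global split at the end; the mutation of document_data['factors'] is performed identically (one list assignment).
import Mathlib
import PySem

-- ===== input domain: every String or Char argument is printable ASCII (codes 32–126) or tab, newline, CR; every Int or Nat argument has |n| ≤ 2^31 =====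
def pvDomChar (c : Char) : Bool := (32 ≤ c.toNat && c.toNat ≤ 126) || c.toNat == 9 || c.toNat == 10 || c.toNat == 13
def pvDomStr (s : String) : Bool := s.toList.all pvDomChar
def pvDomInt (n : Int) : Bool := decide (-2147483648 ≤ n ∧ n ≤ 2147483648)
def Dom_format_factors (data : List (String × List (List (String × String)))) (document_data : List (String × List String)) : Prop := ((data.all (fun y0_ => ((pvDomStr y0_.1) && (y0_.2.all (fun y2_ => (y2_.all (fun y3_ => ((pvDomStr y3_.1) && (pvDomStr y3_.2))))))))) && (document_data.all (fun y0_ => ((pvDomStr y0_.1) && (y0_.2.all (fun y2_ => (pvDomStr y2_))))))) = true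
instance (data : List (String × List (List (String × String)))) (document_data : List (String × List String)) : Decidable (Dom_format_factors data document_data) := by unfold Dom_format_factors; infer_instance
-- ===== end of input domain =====

-- B replaces A's one accumulating string-building loop + single global split by a
-- name-gathering map followed by a per-name tokenization pass (objective: simpler).
-- Both Pythons mutate document_data["factors"] identically (the list of factor names);
-- the equivalence proved here is about the RETURN value.

-- ===== PORT A =====
-- A's helper get_value(data, key, default="N/A"): a falsy value (missing key or "") gives the default
def pv_get_value (d : List (String × String)) (key : String) (dflt : String) : String :=
  match d.lookup key with
  | none => dflt
  | some v => if v = "" then dflt else v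

def format_factors (data : List (String × List (List (String × String)))) (document_data : List (String × List String)) : List String :=
  -- document_data["factors"] := names (side effect, not part of the return value)
  let factors := (data.lookup "factors").getD []
  -- text accumulated as List Char (Python str concatenation, ported exactly on code points)
  let text : List Char :=
    factors.foldl (fun t factor => t ++ (pv_get_value factor "factorName" "N/A").toList ++ ['\n']) []
  (PySem.Chars.split₀ text).map String.ofList  -- text.split()

-- ===== PORT B =====
def format_factors_alt (data : List (String × List (List (String × String)))) (document_data : List (String × List String)) : List String :=
  let factors := (data.lookup "factors").getD []
  let names := factors.map (fun f =>
    match f.lookup "factorName" with            -- f.get("factorName") or "N/A"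
    | none => "N/A"
    | some v => if v = "" then "N/A" else v)
  -- words = []; for name in names: words.extend(name.split())
  names.foldl (fun words name => words ++ PySem.Str.split₀ name) []

-- ===== PRECONDITION & SPEC =====
def Spec_format_factors (data : List (String × List (List (String × String)))) (document_data : List (String × List String)) (out : List String) : Prop := out = format_factors_alt data document_data
instance (data : List (String × List (List (String × String)))) (document_data : List (String × List String)) (out : List String) : Decidable (Spec_format_factors data document_data out) := by unfold Spec_format_factors; infer_instance

-- ===== CLAIM (what is proved, stated in full; the proofs are below) =====
def Claim_equal_format_factors : Prop := ∀ (data : List (String × List (List (String × String)))) (document_data : List (String × List String)), Dom_format_factors data document_data → Spec_format_factors data document_data (format_factors data document_data)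

-- ===== LEMMAS AND PROOFS =====

-- one-step unfoldings of the library's split₀.go (definitional)
theorem pv_go_nil (cur : List Char) (acc : List (List Char)) :
    PySem.Chars.split₀.go [] cur acc =
      if cur.isEmpty then acc.reverse else (cur.reverse :: acc).reverse := rfl

theorem pv_go_cons (c : Char) (rest cur : List Char) (acc : List (List Char)) :
    PySem.Chars.split₀.go (c :: rest) cur acc =
      if PySem.Chars.isspace c then
        (if cur.isEmpty then PySem.Chars.split₀.go rest [] acc
         else PySem.Chars.split₀.go rest [] (cur.reverse :: acc))
      else PySem.Chars.split₀.go rest (c :: cur) acc := rfl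

-- split₀.go only reads acc through the final reverse-and-return
theorem pv_go_acc (s : List Char) : ∀ (cur : List Char) (acc : List (List Char)),
    PySem.Chars.split₀.go s cur acc = acc.reverse ++ PySem.Chars.split₀.go s cur [] := by
  induction s with
  | nil =>
    intro cur acc
    rw [pv_go_nil, pv_go_nil]
    by_cases h : cur.isEmpty <;> simp [h]
  | cons c rest ih =>
    intro cur acc
    rw [pv_go_cons, pv_go_cons]
    by_cases hs : PySem.Chars.isspace c
    · by_cases h : cur.isEmpty
      · simp only [hs, h, if_true]
        exact ih [] acc
      · simp only [hs, h, if_true]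
        rw [ih [] (cur.reverse :: acc), ih [] [cur.reverse]]
        simp
    · simp only [hs]
      exact ih (c :: cur) acc

-- a whitespace character cuts the word list cleanly
theorem pv_go_split (c : Char) (hc : PySem.Chars.isspace c = true) (v : List Char) :
    ∀ (u cur : List Char),
    PySem.Chars.split₀.go (u ++ c :: v) cur [] =
      PySem.Chars.split₀.go u cur [] ++ PySem.Chars.split₀.go v [] [] := by
  intro u
  induction u with
  | nil =>
    intro cur
    rw [List.nil_append, pv_go_cons, pv_go_nil]
    by_cases h : cur.isEmpty
    · simp [hc, h]
    · simp only [hc, h, if_true]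
      rw [pv_go_acc v [] [cur.reverse]]
      simp
  | cons d u' ih =>
    intro cur
    rw [List.cons_append, pv_go_cons, pv_go_cons]
    by_cases hd : PySem.Chars.isspace d
    · by_cases h : cur.isEmpty
      · simp only [hd, h, if_true]
        exact ih []
      · simp only [hd, h, if_true]
        rw [pv_go_acc (u' ++ c :: v) [] [cur.reverse], ih [],
            pv_go_acc u' [] [cur.reverse]]
        simp
    · simp only [hd]
      exact ih (d :: cur)

theorem pv_split₀_append_ws (c : Char) (hc : PySem.Chars.isspace c = true)
    (u v : List Char) :
    PySem.Chars.split₀ (u ++ c :: v) = PySem.Chars.split₀ u ++ PySem.Chars.split₀ v := by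
  simp only [PySem.Chars.split₀]
  exact pv_go_split c hc v u []

-- the newline-joined names split exactly into the per-name splits
theorem pv_split_flatMap (names : List String) :
    (PySem.Chars.split₀ (names.flatMap (fun n => n.toList ++ ['\n']))).map String.ofList
      = names.flatMap PySem.Str.split₀ := by
  induction names with
  | nil => simp [PySem.Chars.split₀, pv_go_nil]
  | cons n rest ih =>
    have h : (n :: rest).flatMap (fun n => n.toList ++ ['\n'])
        = n.toList ++ '\n' :: rest.flatMap (fun n => n.toList ++ ['\n']) := by
      simp
    rw [h, pv_split₀_append_ws '\n' (by decide), List.map_append, ih, List.flatMap_cons]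
    rfl

-- ===== VERDICT (by name: the statement is the Claim_ definition above) =====
theorem format_factors_spec : Claim_equal_format_factors := by
  intro data document_data _
  unfold Spec_format_factors format_factors format_factors_alt
  set factors := (data.lookup "factors").getD [] with hf
  have hA : factors.foldl
      (fun t factor => t ++ (pv_get_value factor "factorName" "N/A").toList ++ ['\n']) []
      = (factors.map (fun f => pv_get_value f "factorName" "N/A")).flatMap
          (fun n => n.toList ++ ['\n']) := by
    have h0 := PySem.List.foldl_append_eq_flatMap
      (fun factor => (pv_get_value factor "factorName" "N/A").toList ++ ['\n']) factors []
    simp only [List.nil_append] at h0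
    rw [List.flatMap_map]
    rw [← h0]
    apply PySem.List.foldl_congr_mem
    intro t factor _
    simp [List.append_assoc]
  have hB : (factors.map (fun f =>
      match f.lookup "factorName" with
      | none => "N/A"
      | some v => if v = "" then "N/A" else v)).foldl
        (fun words name => words ++ PySem.Str.split₀ name) []
      = (factors.map (fun f => pv_get_value f "factorName" "N/A")).flatMap PySem.Str.split₀ := by
    rw [PySem.List.foldl_append_eq_flatMap]
    rw [List.nil_append, List.flatMap_map, List.flatMap_map]
    apply congrArg (List.flatMap · factors)
    funext f
    show PySem.Str.split₀ _ = PySem.Str.split₀ (pv_get_value f "factorName" "N/A")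
    unfold pv_get_value
    rcases f.lookup "factorName" with _ | v
    · rfl
    · by_cases hv : v = "" <;> simp [hv]
  simp only [hA, hB, pv_split_flatMap]
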